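-- pv_equiv track=rewrite | github.com/DanielGRasmussen/Grim-Dawn-Res-Calculator | addon_parser.py | find_end_of_addon
-- ===== SOURCE A (Python) =====
-- def find_end_of_addon(lines, start, name):
-- 	end = start + 1
-- 	found = False
-- 	recent = False
-- 	potential_end = 0
-- 	while end < len(lines):
-- 		if lines[end] == name or lines[end] == f"Blueprint: {name}":
-- 			end += 1
-- 			found = True
-- 			break
-- 		if ("Item Level: " in lines[end] or "Faction: " in lines[end]) and (recent or potential_end == 0):
-- 			recent = True
-- 			potential_end = end + 1
-- 		else:
-- 			recent = False
-- 		end += 1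
--
-- 	if not found and potential_end != 0:
-- 		end = potential_end
--
-- 	return end
-- ===== SOURCE B (Python) =====
-- # Two-phase search instead of A's one-pass state machine: phase 1 scans for the
-- # terminator line; phase 2 finds the first contiguous run of special lines.
-- def find_end_of_addon(lines, start, name):
-- 	n = len(lines)
-- 	for i in range(start + 1, n):
-- 		if lines[i] == name or lines[i] == "Blueprint: " + name:
-- 			return i + 1
-- 	i = start + 1
-- 	while i < n and not ("Item Level: " in lines[i] or "Faction: " in lines[i]):
-- 		i += 1
-- 	if i >= n:
-- 		return max(start + 1, n)
-- 	i += 1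
-- 	while i < n and ("Item Level: " in lines[i] or "Faction: " in lines[i]):
-- 		i += 1
-- 	return i
-- ===== Notes on version B (the rewrite author's own statement) =====
-- stated objective: simpler
-- what changed: A's single pass with found/recent/potential_end flag state is replaced by two independent phases: a scan for the terminator line, then a plain first-contiguous-run scan for 'Item Level: '/'Faction: ' lines, with max(start+1, n) as the default.
-- intended difference: When start+1 is negative and the first contiguous run of special lines of the (Python-negative-index) scan ends exactly at index -1, A's potential_end sentinel collides with 0, so A forgets that run and returns a later run's end or the scan end (always >= 1), while B returns 0, one past the first run, which is what the first-run rule intends. — e.g. on find_end_of_addon(["x", "Faction: f"], -2, "N"): A returns 2, B returns 0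
import Mathlib
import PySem

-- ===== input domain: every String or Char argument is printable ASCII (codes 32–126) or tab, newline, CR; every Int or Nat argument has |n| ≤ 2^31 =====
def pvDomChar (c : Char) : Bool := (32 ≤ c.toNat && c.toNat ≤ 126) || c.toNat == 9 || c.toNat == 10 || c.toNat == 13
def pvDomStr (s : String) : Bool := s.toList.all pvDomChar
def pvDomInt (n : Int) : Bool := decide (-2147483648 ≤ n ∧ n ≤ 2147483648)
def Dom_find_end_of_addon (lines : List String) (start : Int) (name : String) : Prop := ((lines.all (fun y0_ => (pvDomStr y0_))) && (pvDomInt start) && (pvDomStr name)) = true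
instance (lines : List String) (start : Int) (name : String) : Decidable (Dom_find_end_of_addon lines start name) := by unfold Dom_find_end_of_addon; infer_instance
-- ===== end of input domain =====

-- B replaces A's one-pass flag state machine by two independent phases (terminator scan,
-- then first-contiguous-run scan); objective: simpler.

-- ===== PORT A =====
-- lines[end] == name or lines[end] == f"Blueprint: {name}"  (str equality = code-point list equality)
def pvIsTerm (line name : String) : Bool :=
  line.toList == name.toList || line.toList == ("Blueprint: ".toList ++ name.toList)

-- "Item Level: " in lines[end] or "Faction: " in lines[end]
def pvIsSpecial (line : String) : Bool :=
  PySem.Str.isIn "Item Level: " line || PySem.Str.isIn "Faction: " line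

-- the while loop of A; state (end, recent, potential_end); returns (end, found, potential_end).
-- fuel = number of remaining iterations, supplied exactly by the wrapper findA_loop.
def findA_go (lines : List String) (name : String) : Nat → Int → Bool → Int → Int × Bool × Int
  | 0, i, _, pe => (i, false, pe)
  | fuel + 1, i, recent, pe =>
    if i < (lines.length : Int) then
      match PySem.List.pyGet? lines i with
      | none => (i, false, pe)  -- lines[i] raises IndexError in Python (outside Pre_)
      | some line =>
        if pvIsTerm line name then (i + 1, true, pe)
        else if pvIsSpecial line && (recent || pe == 0) then
          findA_go lines name fuel (i + 1) true (i + 1)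
        else findA_go lines name fuel (i + 1) false pe
    else (i, false, pe)

def findA_loop (lines : List String) (name : String) (i : Int) (recent : Bool) (pe : Int) :
    Int × Bool × Int :=
  findA_go lines name ((lines.length : Int) - i).toNat i recent pe

def find_end_of_addon (lines : List String) (start : Int) (name : String) : Int :=
  let r := findA_loop lines name (start + 1) false 0
  if !r.2.1 && r.2.2 != 0 then r.2.2 else r.1

-- ===== PORT B =====
-- phase 1: for i in range(start+1, n): terminator?
def findBterm_go (lines : List String) (name : String) : Nat → Int → Option Int
  | 0, _ => none
  | fuel + 1, i =>
    if i < (lines.length : Int) then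
      match PySem.List.pyGet? lines i with
      | none => none  -- lines[i] raises IndexError in Python (outside Pre_)
      | some line =>
        if pvIsTerm line name then some (i + 1)
        else findBterm_go lines name fuel (i + 1)
    else none

def findB_term (lines : List String) (name : String) (i : Int) : Option Int :=
  findBterm_go lines name ((lines.length : Int) - i).toNat i

-- phase 2a: while i < n and not special(lines[i]): i += 1
def findBskip_go (lines : List String) : Nat → Int → Int
  | 0, i => i
  | fuel + 1, i =>
    if i < (lines.length : Int) then
      match PySem.List.pyGet? lines i with
      | none => i  -- lines[i] raises IndexError in Python (outside Pre_)
      | some line => if !pvIsSpecial line then findBskip_go lines fuel (i + 1) else i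
    else i

def findB_skip (lines : List String) (i : Int) : Int :=
  findBskip_go lines ((lines.length : Int) - i).toNat i

-- phase 2b: while i < n and special(lines[i]): i += 1
def findBrun_go (lines : List String) : Nat → Int → Int
  | 0, i => i
  | fuel + 1, i =>
    if i < (lines.length : Int) then
      match PySem.List.pyGet? lines i with
      | none => i  -- lines[i] raises IndexError in Python (outside Pre_)
      | some line => if pvIsSpecial line then findBrun_go lines fuel (i + 1) else i
    else i

def findB_run (lines : List String) (i : Int) : Int :=
  findBrun_go lines ((lines.length : Int) - i).toNat i

def find_end_of_addon_alt (lines : List String) (start : Int) (name : String) : Int :=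
  match findB_term lines name (start + 1) with
  | some r => r
  | none =>
    let i := findB_skip lines (start + 1)
    if (lines.length : Int) ≤ i then max (start + 1) (lines.length : Int)
    else findB_run lines (i + 1)

-- ===== PRECONDITION & SPEC =====
-- Pre_ excludes exactly the inputs where Python A raises IndexError: start+1 below -len(lines).
def Pre_find_end_of_addon (lines : List String) (start : Int) (name : String) : Prop :=
  -(lines.length : Int) ≤ start + 1
instance (lines : List String) (start : Int) (name : String) : Decidable (Pre_find_end_of_addon lines start name) := by unfold Pre_find_end_of_addon; infer_instance

def pvWitness_find_end_of_addon : List String × Int × String := (["x"], 0, "y")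

-- When start+1 is negative and the first contiguous run of special lines of the
-- (Python-negative-index) scan ends exactly at index -1, A's potential_end sentinel collides
-- with 0, so A forgets that run and returns a later run's end or the scan end (always ≥ 1),
-- while B returns 0, one past the first run, which is what the first-run rule intends.
-- abbreviation used by D_: is line j (Python indexing) a special line?
def pvSp (lines : List String) (j : Int) : Bool := pvIsSpecial (PySem.List.pyGetD lines j "")

def D_find_end_of_addon (lines : List String) (start : Int) (name : String) : Prop :=
  -(lines.length : Int) ≤ start + 1 ∧ start + 1 ≤ -1 ∧
  (∀ j ∈ PySem.List.pyRange (start + 1) (lines.length : Int) 1,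
      ¬ pvIsTerm (PySem.List.pyGetD lines j "") name) ∧
  pvSp lines (-1) ∧ ¬ pvSp lines 0 ∧
  (∀ j ∈ PySem.List.pyRange (start + 1) (-1) 1, pvSp lines j → pvSp lines (j + 1))
instance (lines : List String) (start : Int) (name : String) : Decidable (D_find_end_of_addon lines start name) := by unfold D_find_end_of_addon; infer_instance

def Spec_find_end_of_addon (lines : List String) (start : Int) (name : String) (out : Int) : Prop := ¬ D_find_end_of_addon lines start name → out = find_end_of_addon_alt lines start name
instance (lines : List String) (start : Int) (name : String) (out : Int) : Decidable (Spec_find_end_of_addon lines start name out) := by unfold Spec_find_end_of_addon; infer_instance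

def pvDiffWitness_find_end_of_addon : List String × Int × String := (["x", "Faction: f"], -2, "N")
def pvDiffWitnessOut_find_end_of_addon : Int × Int := (2, 0)

-- ===== CLAIM (what is proved, stated in full; the proofs are below) =====
def Claim_unchanged_find_end_of_addon : Prop := ∀ (lines : List String) (start : Int) (name : String), Dom_find_end_of_addon lines start name → Pre_find_end_of_addon lines start name → Spec_find_end_of_addon lines start name (find_end_of_addon lines start name)
def Claim_changed_find_end_of_addon : Prop := Dom_find_end_of_addon (pvDiffWitness_find_end_of_addon.1) (pvDiffWitness_find_end_of_addon.2.1) (pvDiffWitness_find_end_of_addon.2.2) ∧ Pre_find_end_of_addon (pvDiffWitness_find_end_of_addon.1) (pvDiffWitness_find_end_of_addon.2.1) (pvDiffWitness_find_end_of_addon.2.2) ∧ D_find_end_of_addon (pvDiffWitness_find_end_of_addon.1) (pvDiffWitness_find_end_of_addon.2.1) (pvDiffWitness_find_end_of_addon.2.2) ∧ find_end_of_addon (pvDiffWitness_find_end_of_addon.1) (pvDiffWitness_find_end_of_addon.2.1) (pvDiffWitness_find_end_of_addon.2.2) = pvDiffWitnessOut_find_end_of_addon.1 ∧ find_end_of_addon_alt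 (pvDiffWitness_find_end_of_addon.1) (pvDiffWitness_find_end_of_addon.2.1) (pvDiffWitness_find_end_of_addon.2.2) = pvDiffWitnessOut_find_end_of_addon.2 ∧ pvDiffWitnessOut_find_end_of_addon.1 ≠ pvDiffWitnessOut_find_end_of_addon.2
def Claim_exact_find_end_of_addon : Prop := ∀ (lines : List String) (start : Int) (name : String), Dom_find_end_of_addon lines start name → Pre_find_end_of_addon lines start name → D_find_end_of_addon lines start name → find_end_of_addon lines start name ≠ find_end_of_addon_alt lines start name

-- ===== LEMMAS AND PROOFS =====

-- A's post-loop fixup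
def pvFinishA (r : Int × Bool × Int) : Int := if !r.2.1 && r.2.2 != 0 then r.2.2 else r.1
-- B's whole computation starting from scan index i
def pvAltFrom (lines : List String) (name : String) (i : Int) : Int :=
  match findB_term lines name i with
  | some r => r
  | none =>
    let f := findB_skip lines i
    if (lines.length : Int) ≤ f then max i (lines.length : Int) else findB_run lines (f + 1)
-- the collision region, phrased on B's scanners: no terminator, and the first special run ends at 0
def pvColl (lines : List String) (name : String) (i : Int) : Prop :=
  findB_term lines name i = none ∧ findB_skip lines i < (lines.length : Int) ∧
    findB_run lines (findB_skip lines i + 1) = 0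

theorem findA_loop_exit (lines : List String) (name : String) (i : Int) (recent : Bool) (pe : Int)
    (h : ¬ i < (lines.length : Int)) : findA_loop lines name i recent pe = (i, false, pe) := by
  have h0 : ((lines.length : Int) - i).toNat = 0 := by omega
  rw [findA_loop, h0]; rfl

theorem findA_loop_step (lines : List String) (name : String) (i : Int) (recent : Bool) (pe : Int)
    (hlo : -(lines.length : Int) ≤ i) (h : i < (lines.length : Int)) :
    findA_loop lines name i recent pe =
      (if pvIsTerm (PySem.List.pyGetD lines i "") name then (i + 1, true, pe)
       else if pvIsSpecial (PySem.List.pyGetD lines i "") && (recent || pe == 0) then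
         findA_loop lines name (i + 1) true (i + 1)
       else findA_loop lines name (i + 1) false pe) := by
  obtain ⟨x, hx⟩ : ∃ x, PySem.List.pyGet? lines i = some x := by
    cases hx : PySem.List.pyGet? lines i with
    | none => rw [PySem.List.pyGet?_eq_none_iff] at hx
              exact absurd (by constructor <;> omega) hx
    | some x => exact ⟨x, rfl⟩
  have hgd : PySem.List.pyGetD lines i "" = x := by simp [PySem.List.pyGetD, hx]
  have hk : ((lines.length : Int) - i).toNat = ((lines.length : Int) - (i + 1)).toNat + 1 := by omega
  rw [findA_loop, hk, findA_go, if_pos h, hx, hgd]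
  rfl

theorem findB_term_exit (lines : List String) (name : String) (i : Int)
    (h : ¬ i < (lines.length : Int)) : findB_term lines name i = none := by
  have h0 : ((lines.length : Int) - i).toNat = 0 := by omega
  rw [findB_term, h0]; rfl

theorem findB_term_step (lines : List String) (name : String) (i : Int)
    (hlo : -(lines.length : Int) ≤ i) (h : i < (lines.length : Int)) :
    findB_term lines name i =
      (if pvIsTerm (PySem.List.pyGetD lines i "") name then some (i + 1)
       else findB_term lines name (i + 1)) := by
  obtain ⟨x, hx⟩ : ∃ x, PySem.List.pyGet? lines i = some x := by
    cases hx : PySem.List.pyGet? lines i with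
    | none => rw [PySem.List.pyGet?_eq_none_iff] at hx
              exact absurd (by constructor <;> omega) hx
    | some x => exact ⟨x, rfl⟩
  have hgd : PySem.List.pyGetD lines i "" = x := by simp [PySem.List.pyGetD, hx]
  have hk : ((lines.length : Int) - i).toNat = ((lines.length : Int) - (i + 1)).toNat + 1 := by omega
  rw [findB_term, hk, findBterm_go, if_pos h, hx, hgd]
  rfl

theorem findB_skip_exit (lines : List String) (i : Int)
    (h : ¬ i < (lines.length : Int)) : findB_skip lines i = i := by
  have h0 : ((lines.length : Int) - i).toNat = 0 := by omega
  rw [findB_skip, h0]; rfl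

theorem findB_skip_step (lines : List String) (i : Int)
    (hlo : -(lines.length : Int) ≤ i) (h : i < (lines.length : Int)) :
    findB_skip lines i =
      (if !pvIsSpecial (PySem.List.pyGetD lines i "") then findB_skip lines (i + 1) else i) := by
  obtain ⟨x, hx⟩ : ∃ x, PySem.List.pyGet? lines i = some x := by
    cases hx : PySem.List.pyGet? lines i with
    | none => rw [PySem.List.pyGet?_eq_none_iff] at hx
              exact absurd (by constructor <;> omega) hx
    | some x => exact ⟨x, rfl⟩
  have hgd : PySem.List.pyGetD lines i "" = x := by simp [PySem.List.pyGetD, hx]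
  have hk : ((lines.length : Int) - i).toNat = ((lines.length : Int) - (i + 1)).toNat + 1 := by omega
  rw [findB_skip, hk, findBskip_go, if_pos h, hx, hgd]
  rfl

theorem findB_run_exit (lines : List String) (i : Int)
    (h : ¬ i < (lines.length : Int)) : findB_run lines i = i := by
  have h0 : ((lines.length : Int) - i).toNat = 0 := by omega
  rw [findB_run, h0]; rfl

theorem findB_run_step (lines : List String) (i : Int)
    (hlo : -(lines.length : Int) ≤ i) (h : i < (lines.length : Int)) :
    findB_run lines i =
      (if pvIsSpecial (PySem.List.pyGetD lines i "") then findB_run lines (i + 1) else i) := by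
  obtain ⟨x, hx⟩ : ∃ x, PySem.List.pyGet? lines i = some x := by
    cases hx : PySem.List.pyGet? lines i with
    | none => rw [PySem.List.pyGet?_eq_none_iff] at hx
              exact absurd (by constructor <;> omega) hx
    | some x => exact ⟨x, rfl⟩
  have hgd : PySem.List.pyGetD lines i "" = x := by simp [PySem.List.pyGetD, hx]
  have hk : ((lines.length : Int) - i).toNat = ((lines.length : Int) - (i + 1)).toNat + 1 := by omega
  rw [findB_run, hk, findBrun_go, if_pos h, hx, hgd]
  rfl



theorem pv_getD_nil (i : Int) : PySem.List.pyGetD ([] : List String) i "" = "" := by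
  simp [PySem.List.pyGetD, PySem.List.pyGet?]

theorem pv_len_pos_of_special (lines : List String) (i : Int)
    (h : pvIsSpecial (PySem.List.pyGetD lines i "") = true) : 1 ≤ (lines.length : Int) := by
  cases lines with
  | nil => rw [pv_getD_nil] at h; exact absurd h (by decide)
  | cons a l => simp only [List.length_cons]; push_cast; omega

theorem pv_skip_ge (lines : List String) :
    ∀ (k : Nat) (i : Int), -(lines.length : Int) ≤ i → ((lines.length : Int) - i).toNat ≤ k → i ≤ findB_skip lines i := by
  intro k
  induction k with
  | zero => intro i hlo hk; rw [findB_skip_exit lines i (by omega)]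
  | succ k ih =>
    intro i hlo hk
    by_cases h : i < (lines.length : Int)
    · rw [findB_skip_step lines i hlo h]
      by_cases hsp : pvIsSpecial (PySem.List.pyGetD lines i "")
      · rw [if_neg (by simp [hsp])]
      · rw [if_pos (by simp [hsp])]
        have := ih (i + 1) (by omega) (by omega)
        omega
    · rw [findB_skip_exit lines i h]

theorem pv_run_ge (lines : List String) :
    ∀ (k : Nat) (i : Int), -(lines.length : Int) ≤ i → ((lines.length : Int) - i).toNat ≤ k → i ≤ findB_run lines i := by
  intro k
  induction k with
  | zero => intro i hlo hk; rw [findB_run_exit lines i (by omega)]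
  | succ k ih =>
    intro i hlo hk
    by_cases h : i < (lines.length : Int)
    · rw [findB_run_step lines i hlo h]
      by_cases hsp : pvIsSpecial (PySem.List.pyGetD lines i "")
      · rw [if_pos hsp]
        have := ih (i + 1) (by omega) (by omega)
        omega
      · rw [if_neg hsp]
    · rw [findB_run_exit lines i h]

-- if phase 1 finds the terminator at result r, A's loop stops there too, from any state
theorem pv_lemT (lines : List String) (name : String) :
    ∀ (k : Nat) (i : Int) (recent : Bool) (pe r : Int),
      -(lines.length : Int) ≤ i → ((lines.length : Int) - i).toNat ≤ k → findB_term lines name i = some r →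
      pvFinishA (findA_loop lines name i recent pe) = r := by
  intro k
  induction k with
  | zero =>
    intro i recent pe r hlo hk ht
    rw [findB_term_exit lines name i (by omega)] at ht
    exact absurd ht (by simp)
  | succ k ih =>
    intro i recent pe r hlo hk ht
    by_cases h : i < (lines.length : Int)
    · rw [findB_term_step lines name i hlo h] at ht
      rw [findA_loop_step lines name i recent pe hlo h]
      by_cases hterm : pvIsTerm (PySem.List.pyGetD lines i "") name
      · rw [if_pos hterm] at ht ⊢
        simp only [Option.some.injEq] at ht
        simp [pvFinishA, ht]
      · rw [if_neg hterm] at ht ⊢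
        by_cases hsp : pvIsSpecial (PySem.List.pyGetD lines i "") && (recent || pe == 0)
        · rw [if_pos hsp]; exact ih (i + 1) true (i + 1) r (by omega) (by omega) ht
        · rw [if_neg hsp]; exact ih (i + 1) false pe r (by omega) (by omega) ht
    · rw [findB_term_exit lines name i h] at ht; exact absurd ht (by simp)


-- state (recent = false, pe ≠ 0) is absorbing: with no terminator ahead the fixup returns pe
theorem pv_lemS2 (lines : List String) (name : String) :
    ∀ (k : Nat) (i pe : Int),
      -(lines.length : Int) ≤ i → ((lines.length : Int) - i).toNat ≤ k → pe ≠ 0 → findB_term lines name i = none →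
      pvFinishA (findA_loop lines name i false pe) = pe := by
  intro k
  induction k with
  | zero =>
    intro i pe hlo hk hpe _
    rw [findA_loop_exit lines name i false pe (by omega)]
    simp [pvFinishA, hpe]
  | succ k ih =>
    intro i pe hlo hk hpe ht
    by_cases h : i < (lines.length : Int)
    · rw [findB_term_step lines name i hlo h] at ht
      rw [findA_loop_step lines name i false pe hlo h]
      by_cases hterm : pvIsTerm (PySem.List.pyGetD lines i "") name
      · rw [if_pos hterm] at ht; exact absurd ht (by simp)
      · rw [if_neg hterm] at ht ⊢
        have hc : ¬ (pvIsSpecial (PySem.List.pyGetD lines i "") && (false || pe == 0)) = true := by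
          intro hcon
          simp [Bool.and_eq_true] at hcon
          exact hpe hcon.2
        rw [if_neg hc]
        exact ih (i + 1) pe (by omega) (by omega) hpe ht
    · rw [findA_loop_exit lines name i false pe h]
      simp [pvFinishA, hpe]

-- state (recent = true, pe = i): A follows the current special run; if the run ends at 0 the
-- sentinel collides and A restarts from scratch at index 1
theorem pv_lemS1 (lines : List String) (name : String) :
    ∀ (k : Nat) (i : Int),
      -(lines.length : Int) ≤ i → ((lines.length : Int) - i).toNat ≤ k → 1 ≤ (lines.length : Int) →
      i ≤ (lines.length : Int) → findB_term lines name i = none →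
      pvFinishA (findA_loop lines name i true i) =
        (if findB_run lines i = 0 then pvFinishA (findA_loop lines name 1 false 0)
         else findB_run lines i) := by
  intro k
  induction k with
  | zero =>
    intro i hlo hk hn hin _
    have h : ¬ i < (lines.length : Int) := by omega
    have hi : i = (lines.length : Int) := by omega
    rw [findA_loop_exit lines name i true i h, findB_run_exit lines i h, if_neg (by omega)]
    have hne : i ≠ 0 := by omega
    simp [pvFinishA, hne]
  | succ k ih =>
    intro i hlo hk hn hin ht
    by_cases h : i < (lines.length : Int)
    · rw [findB_term_step lines name i hlo h] at ht
      by_cases hterm : pvIsTerm (PySem.List.pyGetD lines i "") name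
      · rw [if_pos hterm] at ht; exact absurd ht (by simp)
      · rw [if_neg hterm] at ht
        rw [findA_loop_step lines name i true i hlo h, if_neg hterm]
        by_cases hsp : pvIsSpecial (PySem.List.pyGetD lines i "")
        · rw [if_pos (by simp [hsp]), findB_run_step lines i hlo h, if_pos hsp]
          exact ih (i + 1) (by omega) (by omega) hn (by omega) ht
        · rw [if_neg (by simp [hsp]), findB_run_step lines i hlo h, if_neg hsp]
          by_cases hz : i = 0
          · subst hz; rw [if_pos rfl]; norm_num
          · rw [if_neg hz]
            exact pv_lemS2 lines name k (i + 1) i (by omega) (by omega) hz ht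
    · have hne : i ≠ 0 := by omega
      rw [findA_loop_exit lines name i true i h, findB_run_exit lines i h, if_neg (by omega)]
      simp [pvFinishA, hne]

-- main walk from the initial state (recent = false, pe = 0): A equals B outside the collision
theorem pv_lemG (lines : List String) (name : String) :
    ∀ (k : Nat) (i : Int),
      -(lines.length : Int) ≤ i → ((lines.length : Int) - i).toNat ≤ k → ¬ pvColl lines name i →
      pvFinishA (findA_loop lines name i false 0) = pvAltFrom lines name i := by
  intro k
  induction k with
  | zero =>
    intro i hlo hk _
    have h : ¬ i < (lines.length : Int) := by omega
    rw [findA_loop_exit lines name i false 0 h]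
    rw [pvAltFrom, findB_term_exit lines name i h]
    simp only [findB_skip_exit lines i h]
    rw [if_pos (by omega)]
    simp [pvFinishA]
    omega
  | succ k ih =>
    intro i hlo hk hcoll
    by_cases h : i < (lines.length : Int)
    · by_cases hterm : pvIsTerm (PySem.List.pyGetD lines i "") name
      · rw [findA_loop_step lines name i false 0 hlo h, if_pos hterm]
        rw [pvAltFrom, findB_term_step lines name i hlo h, if_pos hterm]
        simp [pvFinishA]
      · have htstep : findB_term lines name i = findB_term lines name (i + 1) := by
          rw [findB_term_step lines name i hlo h, if_neg hterm]
        by_cases hsp : pvIsSpecial (PySem.List.pyGetD lines i "")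
        · -- first special line: A enters the run state, B's skip stops here
          have hn1 : 1 ≤ (lines.length : Int) := pv_len_pos_of_special lines i hsp
          have hskip : findB_skip lines i = i := by
            rw [findB_skip_step lines i hlo h, if_neg (by simp [hsp])]
          rw [findA_loop_step lines name i false 0 hlo h, if_neg hterm, if_pos (by simp [hsp])]
          cases hfb : findB_term lines name (i + 1) with
          | some r =>
            rw [pvAltFrom, htstep, hfb]
            exact pv_lemT lines name k (i + 1) true (i + 1) r (by omega) (by omega) hfb
          | none =>
            have hrun : findB_run lines (i + 1) ≠ 0 := by
              intro h0
              exact hcoll ⟨by rw [htstep, hfb], by rw [hskip]; exact h, by rw [hskip]; exact h0⟩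
            rw [pv_lemS1 lines name k (i + 1) (by omega) (by omega) hn1 (by omega) hfb, if_neg hrun]
            rw [pvAltFrom, htstep, hfb]
            simp only [hskip]
            rw [if_neg (by omega)]
        · -- ordinary line: both sides step to i+1
          have hskip : findB_skip lines i = findB_skip lines (i + 1) := by
            rw [findB_skip_step lines i hlo h, if_pos (by simp [hsp])]
          have hcoll' : ¬ pvColl lines name (i + 1) := by
            intro hc
            exact hcoll ⟨by rw [htstep]; exact hc.1, by rw [hskip]; exact hc.2.1,
              by rw [hskip]; exact hc.2.2⟩
          rw [findA_loop_step lines name i false 0 hlo h, if_neg hterm, if_neg (by simp [hsp])]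
          rw [ih (i + 1) (by omega) (by omega) hcoll']
          rw [pvAltFrom, pvAltFrom, htstep]
          cases hfb : findB_term lines name (i + 1) with
          | some r => rfl
          | none =>
            simp only [hskip]
            by_cases hf : (lines.length : Int) ≤ findB_skip lines (i + 1)
            · rw [if_pos hf, if_pos hf]
              have : i + 1 ≤ findB_skip lines (i + 1) :=
                pv_skip_ge lines ((lines.length : Int) - (i + 1)).toNat (i + 1) (by omega) le_rfl
              omega
            · rw [if_neg hf, if_neg hf]
    · -- i past the end: loop never entered
      have h0 := findA_loop_exit lines name i false 0 h
      rw [h0, pvAltFrom, findB_term_exit lines name i h]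
      simp only [findB_skip_exit lines i h]
      rw [if_pos (by omega)]
      simp [pvFinishA]
      omega


theorem pv_term_none_spec (lines : List String) (name : String) :
    ∀ (k : Nat) (i : Int), -(lines.length : Int) ≤ i → ((lines.length : Int) - i).toNat ≤ k →
      findB_term lines name i = none →
      ∀ j : Int, i ≤ j → j < (lines.length : Int) →
        pvIsTerm (PySem.List.pyGetD lines j "") name = false := by
  intro k
  induction k with
  | zero => intro i hlo hk _ j hij hjn; omega
  | succ k ih =>
    intro i hlo hk ht j hij hjn
    have h : i < (lines.length : Int) := by omega
    rw [findB_term_step lines name i hlo h] at ht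
    by_cases hterm : pvIsTerm (PySem.List.pyGetD lines i "") name
    · rw [if_pos hterm] at ht; exact absurd ht (by simp)
    · rw [if_neg hterm] at ht
      rcases eq_or_lt_of_le hij with hji | hji
      · rw [← hji]; exact Bool.not_eq_true _ ▸ (by simpa using hterm)
      · exact ih (i + 1) (by omega) (by omega) ht j (by omega) hjn

theorem pv_term_none_of (lines : List String) (name : String) :
    ∀ (k : Nat) (i : Int), -(lines.length : Int) ≤ i → ((lines.length : Int) - i).toNat ≤ k →
      (∀ j : Int, i ≤ j → j < (lines.length : Int) →
        pvIsTerm (PySem.List.pyGetD lines j "") name = false) →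
      findB_term lines name i = none := by
  intro k
  induction k with
  | zero => intro i hlo hk _; exact findB_term_exit lines name i (by omega)
  | succ k ih =>
    intro i hlo hk hall
    by_cases h : i < (lines.length : Int)
    · rw [findB_term_step lines name i hlo h, if_neg (by simp [hall i le_rfl h])]
      exact ih (i + 1) (by omega) (by omega) (fun j hij hjn => hall j (by omega) hjn)
    · exact findB_term_exit lines name i h

theorem pv_skip_sp (lines : List String) :
    ∀ (k : Nat) (i : Int), -(lines.length : Int) ≤ i → ((lines.length : Int) - i).toNat ≤ k →
      findB_skip lines i < (lines.length : Int) →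
      pvIsSpecial (PySem.List.pyGetD lines (findB_skip lines i) "") = true := by
  intro k
  induction k with
  | zero =>
    intro i hlo hk hlt
    rw [findB_skip_exit lines i (by omega)] at hlt
    omega
  | succ k ih =>
    intro i hlo hk hlt
    by_cases h : i < (lines.length : Int)
    · by_cases hsp : pvIsSpecial (PySem.List.pyGetD lines i "")
      · rw [findB_skip_step lines i hlo h, if_neg (by simp [hsp])]
        exact hsp
      · have he : findB_skip lines i = findB_skip lines (i + 1) := by
          rw [findB_skip_step lines i hlo h, if_pos (by simp [hsp])]
        rw [he] at hlt ⊢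
        exact ih (i + 1) (by omega) (by omega) hlt
    · rw [findB_skip_exit lines i h] at hlt; omega

theorem pv_skip_before (lines : List String) :
    ∀ (k : Nat) (i : Int), -(lines.length : Int) ≤ i → ((lines.length : Int) - i).toNat ≤ k →
      ∀ j : Int, i ≤ j → j < findB_skip lines i →
        pvIsSpecial (PySem.List.pyGetD lines j "") = false := by
  intro k
  induction k with
  | zero =>
    intro i hlo hk j hij hjk
    rw [findB_skip_exit lines i (by omega)] at hjk; omega
  | succ k ih =>
    intro i hlo hk j hij hjk
    by_cases h : i < (lines.length : Int)
    · by_cases hsp : pvIsSpecial (PySem.List.pyGetD lines i "")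
      · rw [findB_skip_step lines i hlo h, if_neg (by simp [hsp])] at hjk; omega
      · have he : findB_skip lines i = findB_skip lines (i + 1) := by
          rw [findB_skip_step lines i hlo h, if_pos (by simp [hsp])]
        rcases eq_or_lt_of_le hij with hji | hji
        · rw [← hji]; simpa using hsp
        · rw [he] at hjk
          exact ih (i + 1) (by omega) (by omega) j (by omega) hjk
    · rw [findB_skip_exit lines i h] at hjk; omega

theorem pv_run_between (lines : List String) :
    ∀ (k : Nat) (i : Int), -(lines.length : Int) ≤ i → ((lines.length : Int) - i).toNat ≤ k →
      ∀ j : Int, i ≤ j → j < findB_run lines i →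
        pvIsSpecial (PySem.List.pyGetD lines j "") = true := by
  intro k
  induction k with
  | zero =>
    intro i hlo hk j hij hjk
    rw [findB_run_exit lines i (by omega)] at hjk; omega
  | succ k ih =>
    intro i hlo hk j hij hjk
    by_cases h : i < (lines.length : Int)
    · by_cases hsp : pvIsSpecial (PySem.List.pyGetD lines i "")
      · have he : findB_run lines i = findB_run lines (i + 1) := by
          rw [findB_run_step lines i hlo h, if_pos hsp]
        rcases eq_or_lt_of_le hij with hji | hji
        · rw [← hji]; exact hsp
        · rw [he] at hjk
          exact ih (i + 1) (by omega) (by omega) j (by omega) hjk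
      · rw [findB_run_step lines i hlo h, if_neg hsp] at hjk; omega
    · rw [findB_run_exit lines i h] at hjk; omega

theorem pv_run_end_nsp (lines : List String) :
    ∀ (k : Nat) (i : Int), -(lines.length : Int) ≤ i → ((lines.length : Int) - i).toNat ≤ k →
      findB_run lines i < (lines.length : Int) →
      pvIsSpecial (PySem.List.pyGetD lines (findB_run lines i) "") = false := by
  intro k
  induction k with
  | zero =>
    intro i hlo hk hlt
    rw [findB_run_exit lines i (by omega)] at hlt; omega
  | succ k ih =>
    intro i hlo hk hlt
    by_cases h : i < (lines.length : Int)
    · by_cases hsp : pvIsSpecial (PySem.List.pyGetD lines i "")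
      · have he : findB_run lines i = findB_run lines (i + 1) := by
          rw [findB_run_step lines i hlo h, if_pos hsp]
        rw [he] at hlt ⊢
        exact ih (i + 1) (by omega) (by omega) hlt
      · rw [findB_run_step lines i hlo h, if_neg hsp] at hlt ⊢
        simpa using hsp
    · rw [findB_run_exit lines i h] at hlt; omega

theorem pv_run_eq (lines : List String) :
    ∀ (k : Nat) (i m : Int), -(lines.length : Int) ≤ i → ((lines.length : Int) - i).toNat ≤ k →
      i ≤ m → m < (lines.length : Int) →
      (∀ j : Int, i ≤ j → j < m → pvIsSpecial (PySem.List.pyGetD lines j "") = true) →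
      pvIsSpecial (PySem.List.pyGetD lines m "") = false →
      findB_run lines i = m := by
  intro k
  induction k with
  | zero => intro i m hlo hk him hmn _ _; omega
  | succ k ih =>
    intro i m hlo hk him hmn hbet hnsp
    have h : i < (lines.length : Int) := by omega
    rcases eq_or_lt_of_le him with hmi | hmi
    · rw [findB_run_step lines i hlo h, if_neg (by rw [hmi]; simp [hnsp])]
      omega
    · rw [findB_run_step lines i hlo h, if_pos (hbet i le_rfl hmi)]
      exact ih (i + 1) m (by omega) (by omega) (by omega) hmn (fun j hij hjm => hbet j (by omega) hjm) hnsp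

-- A's loop walks unchanged through plain lines in the initial state
theorem pv_state0_walk (lines : List String) (name : String) :
    ∀ (k : Nat) (i m : Int), -(lines.length : Int) ≤ i → (m - i).toNat ≤ k → i ≤ m → m ≤ (lines.length : Int) →
      (∀ j : Int, i ≤ j → j < m →
        pvIsTerm (PySem.List.pyGetD lines j "") name = false ∧
        pvIsSpecial (PySem.List.pyGetD lines j "") = false) →
      findA_loop lines name i false 0 = findA_loop lines name m false 0 := by
  intro k
  induction k with
  | zero => intro i m hlo hk him _ _; have : i = m := by omega
            rw [this]
  | succ k ih =>
    intro i m hlo hk him hmn hall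
    rcases eq_or_lt_of_le him with hmi | hmi
    · rw [hmi]
    · have h : i < (lines.length : Int) := by omega
      obtain ⟨ht, hsp⟩ := hall i le_rfl hmi
      rw [findA_loop_step lines name i false 0 hlo h, if_neg (by simp [ht]),
        if_neg (by simp [hsp])]
      exact ih (i + 1) m (by omega) (by omega) (by omega) hmn (fun j hij hjm => hall j (by omega) hjm)

-- starting at an index ≥ 1 with pe = 0 or pe ≥ 1, A's result is ≥ 1
theorem pv_pos (lines : List String) (name : String) :
    ∀ (k : Nat) (i : Int) (recent : Bool) (pe : Int),
      -(lines.length : Int) ≤ i → ((lines.length : Int) - i).toNat ≤ k → 1 ≤ i → (pe = 0 ∨ 1 ≤ pe) →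
      1 ≤ pvFinishA (findA_loop lines name i recent pe) := by
  intro k
  induction k with
  | zero =>
    intro i recent pe hlo hk hi hpe
    rw [findA_loop_exit lines name i recent pe (by omega)]
    rcases hpe with h0 | h1
    · simp [pvFinishA, h0]; omega
    · have : pe ≠ 0 := by omega
      simp [pvFinishA, this]; omega
  | succ k ih =>
    intro i recent pe hlo hk hi hpe
    by_cases h : i < (lines.length : Int)
    · rw [findA_loop_step lines name i recent pe hlo h]
      by_cases hterm : pvIsTerm (PySem.List.pyGetD lines i "") name
      · rw [if_pos hterm]; simp [pvFinishA]; omega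
      · rw [if_neg hterm]
        by_cases hsp : pvIsSpecial (PySem.List.pyGetD lines i "") && (recent || pe == 0)
        · rw [if_pos hsp]; exact ih (i + 1) true (i + 1) (by omega) (by omega) (by omega) (by omega)
        · rw [if_neg hsp]; exact ih (i + 1) false pe (by omega) (by omega) (by omega) hpe
    · rw [findA_loop_exit lines name i recent pe h]
      rcases hpe with h0 | h1
      · simp [pvFinishA, h0]; omega
      · have : pe ≠ 0 := by omega
        simp [pvFinishA, this]; omega

-- from the first special line onward, the step-closure of D_ makes every line up to -1 special
theorem pv_allsp (lines : List String) (s f : Int)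
    (hspf : pvSp lines f) (hsf : s ≤ f) (_hf : f ≤ -1)
    (hmono : ∀ j ∈ PySem.List.pyRange s (-1) 1, pvSp lines j → pvSp lines (j + 1)) :
    ∀ j : Int, f ≤ j → j ≤ -1 → pvSp lines j := by
  have key : ∀ m : Nat, f + m ≤ -1 → pvSp lines (f + m) := by
    intro m
    induction m with
    | zero => intro _; simpa using hspf
    | succ p ih =>
      intro hle
      have hp : f + (p : Int) ≤ -2 := by push_cast at hle ⊢; omega
      have hsp := ih (by omega)
      have := hmono (f + p) (by rw [PySem.List.mem_pyRange_one]; omega) hsp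
      have he : f + ((p : Nat) + 1 : Nat) = (f + p) + 1 := by push_cast; ring
      rwa [he]
  intro j hfj hj1
  have : j = f + ((j - f).toNat : Int) := by omega
  rw [this]; exact key _ (by omega)

-- the collision region implies the stated closed-form difference condition D_
theorem pv_D_of_coll (lines : List String) (start : Int) (name : String)
    (hpre : -(lines.length : Int) ≤ start + 1)
    (h : pvColl lines name (start + 1)) : D_find_end_of_addon lines start name := by
  obtain ⟨hterm, hflt, hrun⟩ := h
  have hsge : start + 1 ≤ findB_skip lines (start + 1) :=
    pv_skip_ge lines _ (start + 1) hpre le_rfl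
  have hrge : findB_skip lines (start + 1) + 1 ≤ findB_run lines (findB_skip lines (start + 1) + 1) :=
    pv_run_ge lines _ _ (by omega) le_rfl
  rw [hrun] at hrge
  have hspf : pvIsSpecial (PySem.List.pyGetD lines (findB_skip lines (start + 1)) "") = true :=
    pv_skip_sp lines _ (start + 1) hpre le_rfl hflt
  have hn : 1 ≤ (lines.length : Int) := pv_len_pos_of_special lines _ hspf
  have hbet : ∀ j : Int, findB_skip lines (start + 1) + 1 ≤ j → j < 0 → pvSp lines j := by
    intro j h1 h2
    have := pv_run_between lines _ (findB_skip lines (start + 1) + 1) (by omega) le_rfl j h1 (by omega)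
    exact this
  refine ⟨hpre, by omega, ?_, ?_, ?_, ?_⟩
  · intro j hj
    rw [PySem.List.mem_pyRange_one] at hj
    simp [pv_term_none_spec lines name _ (start + 1) hpre le_rfl hterm j hj.1 hj.2]
  · rcases eq_or_lt_of_le (by omega : findB_skip lines (start + 1) ≤ -1) with he | hlt
    · rw [← he]; exact hspf
    · exact hbet (-1) (by omega) (by omega)
  · have := pv_run_end_nsp lines _ (findB_skip lines (start + 1) + 1) (by omega) le_rfl (by omega)
    rw [hrun] at this
    simp [pvSp, this]
  · intro j hj hspj
    rw [PySem.List.mem_pyRange_one] at hj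
    have hjf : findB_skip lines (start + 1) ≤ j := by
      by_contra hc
      have := pv_skip_before lines _ (start + 1) hpre le_rfl j hj.1 (by omega)
      rw [pvSp, this] at hspj; exact absurd hspj (by simp)
    exact hbet (j + 1) (by omega) (by omega)

-- inside D_: B returns 0
theorem pv_B_of_D (lines : List String) (start : Int) (name : String)
    (h : D_find_end_of_addon lines start name) : find_end_of_addon_alt lines start name = 0 := by
  obtain ⟨hpre, hs, hterm, hsp1, hnsp0, hmono⟩ := h
  have hn : 1 ≤ (lines.length : Int) := pv_len_pos_of_special lines (-1) hsp1
  have hfle : findB_skip lines (start + 1) ≤ -1 := by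
    by_contra hc
    have := pv_skip_before lines _ (start + 1) hpre le_rfl (-1) hs (by omega)
    rw [pvSp, this] at hsp1; exact absurd hsp1 (by simp)
  have hsge : start + 1 ≤ findB_skip lines (start + 1) :=
    pv_skip_ge lines _ (start + 1) hpre le_rfl
  have hspf : pvSp lines (findB_skip lines (start + 1)) :=
    pv_skip_sp lines _ (start + 1) hpre le_rfl (by omega)
  have hall := pv_allsp lines (start + 1) (findB_skip lines (start + 1)) hspf hsge hfle hmono
  have htn : findB_term lines name (start + 1) = none :=
    pv_term_none_of lines name _ (start + 1) hpre le_rfl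
      (fun j hij hjn => by
        have := hterm j (by rw [PySem.List.mem_pyRange_one]; exact ⟨hij, hjn⟩)
        simpa using this)
  have hrun : findB_run lines (findB_skip lines (start + 1) + 1) = 0 :=
    pv_run_eq lines _ _ 0 (by omega) le_rfl (by omega) hn
      (fun j hij hj0 => hall j (by omega) (by omega)) (by simpa [pvSp] using hnsp0)
  show pvAltFrom lines name (start + 1) = 0
  rw [pvAltFrom, htn]
  simp only
  rw [if_neg (by omega), hrun]

-- inside D_: A returns something ≥ 1
theorem pv_A_of_D (lines : List String) (start : Int) (name : String)
    (h : D_find_end_of_addon lines start name) : 1 ≤ find_end_of_addon lines start name := by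
  obtain ⟨hpre, hs, hterm, hsp1, hnsp0, hmono⟩ := h
  have hn : 1 ≤ (lines.length : Int) := pv_len_pos_of_special lines (-1) hsp1
  have hterm' : ∀ j : Int, start + 1 ≤ j → j < (lines.length : Int) →
      pvIsTerm (PySem.List.pyGetD lines j "") name = false :=
    fun j hij hjn => by
      have := hterm j (by rw [PySem.List.mem_pyRange_one]; exact ⟨hij, hjn⟩)
      simpa using this
  have hfle : findB_skip lines (start + 1) ≤ -1 := by
    by_contra hc
    have := pv_skip_before lines _ (start + 1) hpre le_rfl (-1) hs (by omega)
    rw [pvSp, this] at hsp1; exact absurd hsp1 (by simp)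
  have hsge : start + 1 ≤ findB_skip lines (start + 1) :=
    pv_skip_ge lines _ (start + 1) hpre le_rfl
  have hspf : pvSp lines (findB_skip lines (start + 1)) :=
    pv_skip_sp lines _ (start + 1) hpre le_rfl (by omega)
  have hall := pv_allsp lines (start + 1) (findB_skip lines (start + 1)) hspf hsge hfle hmono
  show 1 ≤ pvFinishA (findA_loop lines name (start + 1) false 0)
  rw [pv_state0_walk lines name (findB_skip lines (start + 1) - (start + 1)).toNat (start + 1)
    (findB_skip lines (start + 1)) hpre le_rfl (by omega) (by omega)
    (fun j hij hjf => ⟨hterm' j hij (by omega),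
      pv_skip_before lines _ (start + 1) hpre le_rfl j hij hjf⟩)]
  rw [findA_loop_step lines name (findB_skip lines (start + 1)) false 0 (by omega) (by omega),
    if_neg (by simp [hterm' (findB_skip lines (start + 1)) (by omega) (by omega)]),
    if_pos (by simp [pvSp] at hspf; simp [hspf])]
  have htn1 : findB_term lines name (findB_skip lines (start + 1) + 1) = none :=
    pv_term_none_of lines name _ _ (by omega) le_rfl (fun j hij hjn => hterm' j (by omega) hjn)
  rw [pv_lemS1 lines name _ (findB_skip lines (start + 1) + 1) (by omega) le_rfl (by omega) (by omega) htn1]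
  have hrun : findB_run lines (findB_skip lines (start + 1) + 1) = 0 :=
    pv_run_eq lines _ _ 0 (by omega) le_rfl (by omega) hn
      (fun j hij hj0 => hall j (by omega) (by omega)) (by simpa [pvSp] using hnsp0)
  rw [if_pos hrun]
  exact pv_pos lines name _ 1 false 0 (by omega) le_rfl le_rfl (Or.inl rfl)

-- ===== VERDICT (by name: the statement is the Claim_ definition above) =====
theorem find_end_of_addon_spec : Claim_unchanged_find_end_of_addon := by
  intro lines start name _ hPre hnD
  show find_end_of_addon lines start name = find_end_of_addon_alt lines start name
  show pvFinishA (findA_loop lines name (start + 1) false 0) = pvAltFrom lines name (start + 1)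
  exact pv_lemG lines name _ (start + 1) hPre le_rfl (fun hc => hnD (pv_D_of_coll lines start name hPre hc))
theorem find_end_of_addon_changed : Claim_changed_find_end_of_addon := by
  unfold Claim_changed_find_end_of_addon; decide
theorem find_end_of_addon_tight : Claim_exact_find_end_of_addon := by
  intro lines start name _ _ hD
  have hA := pv_A_of_D lines start name hD
  have hB := pv_B_of_D lines start name hD
  omega
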